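-- pv_equiv track=rewrite | github.com/zengtianli/scripts | scripts/document/md_tools.py | strip_blockquotes
-- ===== SOURCE A (Python) =====
-- def strip_blockquotes(text: str) -> str:
--     """删除所有 blockquote 行，并清理残留的连续空行"""
--     lines = text.split("\n")
--     result = []
--     in_code = False
--
--     for line in lines:
--         stripped = line.strip()
--
--         # 跟踪代码块
--         if stripped.startswith("```"):
--             in_code = not in_code
--             result.append(line)
--             continue
--
--         # 代码块内不处理
--         if in_code:
--             result.append(line)
--             continue
--
--         # 跳过 blockquote 行
--         if stripped.startswith(">"):
--             continue
--
--         result.append(line)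
--
--     # 清理连续空行（最多保留 1 个）
--     cleaned = []
--     prev_empty = False
--     for line in result:
--         is_empty = line.strip() == ""
--         if is_empty and prev_empty:
--             continue
--         cleaned.append(line)
--         prev_empty = is_empty
--
--     return "\n".join(cleaned)
-- ===== SOURCE B (Python) =====
-- def strip_blockquotes(text: str) -> str:
--     """Single fused pass: drop blockquote lines and collapse blank runs as we go."""
--     out = []
--     in_code = False
--     prev_empty = False
--     for line in text.split("\n"):
--         stripped = line.strip()
--         fence = stripped.startswith("```")
--         if fence:
--             in_code = not in_code
--         elif not in_code and stripped.startswith(">"):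
--             continue
--         if stripped == "" and prev_empty:
--             continue
--         out.append(line)
--         prev_empty = stripped == ""
--     return "\n".join(out)
-- ===== Notes on version B (the rewrite author's own statement) =====
-- stated objective: simpler
-- what changed: B fuses A's two sequential list-building passes (blockquote removal, then blank-line collapsing) into one streaming loop that maintains in_code and prev_empty together and builds the output once.
import Mathlib
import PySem

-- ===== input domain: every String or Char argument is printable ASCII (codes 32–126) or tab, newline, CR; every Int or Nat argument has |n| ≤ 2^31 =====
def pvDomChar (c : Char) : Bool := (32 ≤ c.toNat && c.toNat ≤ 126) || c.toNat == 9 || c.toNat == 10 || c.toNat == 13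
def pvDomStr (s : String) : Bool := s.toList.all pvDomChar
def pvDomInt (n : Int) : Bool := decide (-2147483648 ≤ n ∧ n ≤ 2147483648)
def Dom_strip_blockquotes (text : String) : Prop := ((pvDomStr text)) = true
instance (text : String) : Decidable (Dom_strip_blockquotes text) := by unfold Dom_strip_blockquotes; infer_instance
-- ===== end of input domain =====

-- B fuses A's two list-building passes into one streaming loop; objective: simpler (one pass, no intermediate list).

-- ===== PORT A =====
-- pass 1 loop body: skip blockquote lines, track code fences
def aStep1 (st : List String × Bool) (line : String) : List String × Bool :=
  let stripped := PySem.Str.strip line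
  if PySem.Str.startswith stripped "```" then (st.1 ++ [line], !st.2)
  else if st.2 then (st.1 ++ [line], st.2)
  else if PySem.Str.startswith stripped ">" then st
  else (st.1 ++ [line], st.2)

-- pass 2 loop body: collapse consecutive blank lines
def aStep2 (st : List String × Bool) (line : String) : List String × Bool :=
  let is_empty := PySem.Str.strip line == ""
  if is_empty && st.2 then st
  else (st.1 ++ [line], is_empty)

def strip_blockquotes (text : String) : String :=
  let lines := (PySem.Str.split? text "\n").getD []   -- sep "\n" ≠ "": never none
  let result := (lines.foldl aStep1 ([], false)).1
  let cleaned := (result.foldl aStep2 ([], false)).1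
  PySem.Str.join "\n" cleaned

-- ===== PORT B =====
-- fused loop body over state (out, in_code, prev_empty)
def bStep (st : List String × Bool × Bool) (line : String) : List String × Bool × Bool :=
  let stripped := PySem.Str.strip line
  let fence := PySem.Str.startswith stripped "```"
  let in_code := if fence then !st.2.1 else st.2.1
  if !fence && !st.2.1 && PySem.Str.startswith stripped ">" then (st.1, in_code, st.2.2)
  else if stripped == "" && st.2.2 then (st.1, in_code, st.2.2)
  else (st.1 ++ [line], in_code, stripped == "")

def strip_blockquotes_alt (text : String) : String :=
  let lines := (PySem.Str.split? text "\n").getD []   -- sep "\n" ≠ "": never none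
  PySem.Str.join "\n" (lines.foldl bStep ([], false, false)).1

-- ===== PRECONDITION & SPEC =====
def Spec_strip_blockquotes (text : String) (out : String) : Prop := out = strip_blockquotes_alt text
instance (text : String) (out : String) : Decidable (Spec_strip_blockquotes text out) := by unfold Spec_strip_blockquotes; infer_instance

-- ===== CLAIM (what is proved, stated in full; the proofs are below) =====
def Claim_equal_strip_blockquotes : Prop := ∀ (text : String), Dom_strip_blockquotes text → Spec_strip_blockquotes text (strip_blockquotes text)

-- ===== LEMMAS AND PROOFS =====

-- recursive characterizations of the three loops (proof helpers only)
def pass1 : List String → Bool → List String × Bool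
  | [], ic => ([], ic)
  | l :: ls, ic =>
    let stripped := PySem.Str.strip l
    if PySem.Str.startswith stripped "```" then
      let r := pass1 ls (!ic); (l :: r.1, r.2)
    else if ic then let r := pass1 ls ic; (l :: r.1, r.2)
    else if PySem.Str.startswith stripped ">" then pass1 ls ic
    else let r := pass1 ls ic; (l :: r.1, r.2)

def pass2 : List String → Bool → List String × Bool
  | [], pe => ([], pe)
  | l :: ls, pe =>
    let e := PySem.Str.strip l == ""
    if e && pe then pass2 ls pe
    else let r := pass2 ls e; (l :: r.1, r.2)

def fused : List String → Bool → Bool → List String × (Bool × Bool)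
  | [], ic, pe => ([], ic, pe)
  | l :: ls, ic, pe =>
    let stripped := PySem.Str.strip l
    let fence := PySem.Str.startswith stripped "```"
    let ic' := if fence then !ic else ic
    if !fence && !ic && PySem.Str.startswith stripped ">" then fused ls ic' pe
    else if (stripped == "") && pe then fused ls ic' pe
    else let r := fused ls ic' (stripped == ""); (l :: r.1, r.2)

lemma foldl_aStep1 (lines : List String) : ∀ (res : List String) (ic : Bool),
    lines.foldl aStep1 (res, ic) = (res ++ (pass1 lines ic).1, (pass1 lines ic).2) := by
  induction lines with
  | nil => intro res ic; simp [pass1]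
  | cons l ls ih =>
    intro res ic
    simp only [List.foldl_cons, aStep1, pass1]
    split_ifs <;> simp [ih]

lemma foldl_aStep2 (lines : List String) : ∀ (res : List String) (pe : Bool),
    lines.foldl aStep2 (res, pe) = (res ++ (pass2 lines pe).1, (pass2 lines pe).2) := by
  induction lines with
  | nil => intro res pe; simp [pass2]
  | cons l ls ih =>
    intro res pe
    simp only [List.foldl_cons, aStep2, pass2]
    split_ifs <;> simp [ih]

lemma foldl_bStep (lines : List String) : ∀ (out : List String) (ic pe : Bool),
    lines.foldl bStep (out, ic, pe) = (out ++ (fused lines ic pe).1, (fused lines ic pe).2) := by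
  induction lines with
  | nil => intro out ic pe; simp [fused]
  | cons l ls ih =>
    intro out ic pe
    simp only [List.foldl_cons, bStep, fused]
    split_ifs <;> simp [ih]

-- the fused loop computes what pass 1 then pass 2 compute
lemma fuse (lines : List String) : ∀ (ic pe : Bool),
    (fused lines ic pe).1 = (pass2 (pass1 lines ic).1 pe).1 := by
  induction lines with
  | nil => intro ic pe; simp [fused, pass1, pass2]
  | cons l ls ih =>
    intro ic pe
    by_cases hf : PySem.Chars.startswith (PySem.Chars.strip l.toList) ['`','`','`']
    · by_cases he : (PySem.Str.strip l == "") && pe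
      · simp [fused, pass1, pass2, hf, he, ih]
      · simp [fused, pass1, pass2, hf, he, ih]
    · by_cases hic : ic
      · by_cases he : (PySem.Str.strip l == "") && pe
        · simp [fused, pass1, pass2, hf, hic, he, ih]
        · simp [fused, pass1, pass2, hf, hic, he, ih]
      · by_cases hbq : PySem.Chars.startswith (PySem.Chars.strip l.toList) ['>']
        · simp [fused, pass1, hf, hic, hbq, ih]
        · by_cases he : (PySem.Str.strip l == "") && pe
          · simp [fused, pass1, pass2, hf, hic, hbq, he, ih]
          · simp [fused, pass1, pass2, hf, hic, hbq, he, ih]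

-- ===== VERDICT (by name: the statement is the Claim_ definition above) =====
theorem strip_blockquotes_spec : Claim_equal_strip_blockquotes := by
  intro text _
  unfold Spec_strip_blockquotes strip_blockquotes strip_blockquotes_alt
  simp [foldl_aStep1, foldl_aStep2, foldl_bStep, fuse]
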